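-- pv_equiv track=rewrite | github.com/zionasemota/magnifying-med-main | analysis.py | _extract_structured_sections
-- ===== SOURCE A (Python) =====
-- from typing import Dict, Any, List, Optional
--
-- def _extract_structured_sections(text: str) -> Dict[str, str]:
--     """Extract structured sections from text"""
--     sections = {}
--     current_section = None
--     current_content = []
--
--     lines = text.split('\n')
--     for line in lines:
--         # Check if line is a section header
--         if line.strip().startswith('**') and line.strip().endswith('**'):
--             if current_section:
--                 sections[current_section] = '\n'.join(current_content).strip()
--             current_section = line.strip().strip('*').strip()
--             current_content = []
--         elif current_section:
--             current_content.append(line)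
--
--     # Add last section
--     if current_section:
--         sections[current_section] = '\n'.join(current_content).strip()
--
--     return sections
-- ===== SOURCE B (Python) =====
-- def _extract_structured_sections(text: str) -> dict:
--     """Extract structured sections from text (index-then-slice two-pass)."""
--     lines = text.split('\n')
--     hdrs = [(i, ln) for i, ln in enumerate(lines)
--             if ln.strip().startswith('**') and ln.strip().endswith('**')]
--     ends = [i for i, _ in hdrs[1:]] + [len(lines)]
--     sections = {}
--     for (start, ln), end in zip(hdrs, ends):
--         name = ln.strip().strip('*').strip()
--         if name:
--             sections[name] = '\n'.join(lines[start + 1:end]).strip()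
--     return sections
-- ===== Notes on version B (the rewrite author's own statement) =====
-- stated objective: alternative
-- what changed: A's single running-accumulator scan (current_section/current_content state with flushes) is replaced by a two-pass index-then-slice decomposition: first collect the (index, line) pairs of all header lines, then build each section by slicing the lines between consecutive header indices.
import Mathlib
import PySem

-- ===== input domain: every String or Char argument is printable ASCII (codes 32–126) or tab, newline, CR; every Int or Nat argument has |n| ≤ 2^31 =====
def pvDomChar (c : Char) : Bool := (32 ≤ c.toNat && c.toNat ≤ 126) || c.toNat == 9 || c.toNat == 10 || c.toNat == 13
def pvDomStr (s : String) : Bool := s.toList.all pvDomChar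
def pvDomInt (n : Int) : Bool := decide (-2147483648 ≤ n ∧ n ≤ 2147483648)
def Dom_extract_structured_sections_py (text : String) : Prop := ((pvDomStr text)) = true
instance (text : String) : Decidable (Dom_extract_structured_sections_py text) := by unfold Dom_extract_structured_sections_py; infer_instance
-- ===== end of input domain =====

-- B replaces A's running-accumulator scan by an index-then-slice two-pass (header positions first,
-- then one slice per section); same return value, objective: alternative decomposition.

-- ===== PORT A =====
-- A-side helpers: the "if current_section: sections[current_section] = …" flush, and one loop iteration
def pvFlushA (st : PySem.Dict String String × Option String × List String) :
    PySem.Dict String String :=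
  match st.2.1 with
  | some cur =>
      if cur == "" then st.1
      else st.1.insert cur (PySem.Str.strip (PySem.Str.join "\n" st.2.2))
  | none => st.1

def pvStepA (st : PySem.Dict String String × Option String × List String)
    (line : String) : PySem.Dict String String × Option String × List String :=
  let s := PySem.Str.strip line
  if PySem.Str.startswith s "**" && PySem.Str.endswith s "**" then
    (pvFlushA st, some (PySem.Str.strip (PySem.Str.stripChars s "*")), [])
  else
    match st.2.1 with
    | some cur => if cur == "" then st else (st.1, st.2.1, st.2.2 ++ [line])
    | none => st

def extract_structured_sections_py (text : String) : List (String × String) :=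
  let lines := (PySem.Str.split? text "\n").getD []
  (pvFlushA (lines.foldl pvStepA (PySem.Dict.empty, none, []))).items

-- ===== PORT B =====
-- B-side helper: one iteration of B's loop over zip(hdrs, ends)
def pvStepB (lines : List String) (secs : PySem.Dict String String)
    (pe : (Int × String) × Int) : PySem.Dict String String :=
  let name := PySem.Str.strip (PySem.Str.stripChars (PySem.Str.strip pe.1.2) "*")
  if name == "" then secs
  else secs.insert name (PySem.Str.strip (PySem.Str.join "\n"
    (PySem.List.slice lines (some (pe.1.1 + 1)) (some pe.2))))

def extract_structured_sections_py_alt (text : String) : List (String × String) :=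
  let lines := (PySem.Str.split? text "\n").getD []
  let hdrs := (PySem.List.enumerate lines).filter (fun p =>
    PySem.Str.startswith (PySem.Str.strip p.2) "**" && PySem.Str.endswith (PySem.Str.strip p.2) "**")
  ((hdrs.zip ((hdrs.drop 1).map (·.1) ++ [(lines.length : Int)])).foldl
    (pvStepB lines) PySem.Dict.empty).items

-- ===== PRECONDITION & SPEC =====
def Spec_extract_structured_sections_py (text : String) (out : List (String × String)) : Prop := out = extract_structured_sections_py_alt text
instance (text : String) (out : List (String × String)) : Decidable (Spec_extract_structured_sections_py text out) := by unfold Spec_extract_structured_sections_py; infer_instance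

-- ===== CLAIM (what is proved, stated in full; the proofs are below) =====
def Claim_equal_extract_structured_sections_py : Prop := ∀ (text : String), Dom_extract_structured_sections_py text → Spec_extract_structured_sections_py text (extract_structured_sections_py text)

-- ===== LEMMAS AND PROOFS =====

-- the header predicate, the section name, and the flushed body text
def pvHdr (l : String) : Bool :=
  PySem.Str.startswith (PySem.Str.strip l) "**" && PySem.Str.endswith (PySem.Str.strip l) "**"
def pvNm (l : String) : String :=
  PySem.Str.strip (PySem.Str.stripChars (PySem.Str.strip l) "*")
def pvFlush (c : List String) : String := PySem.Str.strip (PySem.Str.join "\n" c)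

-- common reference recursion: at a header, grab the run of non-header lines after it
def pvSpan : PySem.Dict String String → List String → PySem.Dict String String
  | d, [] => d
  | d, l :: ls =>
    if pvHdr l then
      pvSpan (if pvNm l == "" then d
              else d.insert (pvNm l) (pvFlush (ls.takeWhile (fun x => !pvHdr x))))
        (ls.dropWhile (fun x => !pvHdr x))
    else pvSpan d ls
termination_by _ ls => ls.length
decreasing_by
  · exact Nat.lt_succ_of_le (List.length_dropWhile_le _ _)
  · simp

lemma pvDropWhile_eq_drop (p : String → Bool) (ls : List String) :
    ls.dropWhile p = ls.drop (ls.takeWhile p).length := by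
  induction ls with
  | nil => rfl
  | cons l ls ih => by_cases h : p l <;> simp [h, ih]

lemma pvTake_takeWhile (p : String → Bool) (ls : List String) :
    ls.take (ls.takeWhile p).length = ls.takeWhile p := by
  induction ls with
  | nil => rfl
  | cons l ls ih => by_cases h : p l <;> simp [h, ih]

lemma pvTakeWhile_of_dropWhile_nil (p : String → Bool) (ls : List String)
    (h : ls.dropWhile p = []) : ls.takeWhile p = ls := by
  have := List.takeWhile_append_dropWhile (p := p) (l := ls)
  rw [h] at this; simpa using this

lemma pvHdr_head_dropWhile (ls : List String) (h r : _) (hh : ls.dropWhile (fun x => !pvHdr x) = h :: r) :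
    pvHdr h = true := by
  induction ls with
  | nil => simp at hh
  | cons l ls ih =>
    by_cases hl : pvHdr l
    · rw [List.dropWhile_cons_of_neg (by simp [hl])] at hh
      cases hh; exact hl
    · rw [List.dropWhile_cons_of_pos (by simp [hl])] at hh
      exact ih hh

lemma pvSpan_dropWhile (ls : List String) (d : PySem.Dict String String) :
    pvSpan d (ls.dropWhile (fun x => !pvHdr x)) = pvSpan d ls := by
  induction ls with
  | nil => rfl
  | cons l ls ih =>
    by_cases h : pvHdr l
    · rw [List.dropWhile_cons_of_neg (by simp [h])]
    · rw [List.dropWhile_cons_of_pos (by simp [h])]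
      rw [ih]
      rw [pvSpan]
      simp [h]

-- A's loop, in both modes at once: inside a truthy section, and with falsy current_section
lemma pvA_combined (ls : List String) :
    (∀ (d : PySem.Dict String String) (s : String) (c : List String), ¬ (s == "") = true →
      pvFlushA (ls.foldl pvStepA (d, some s, c)) =
        pvSpan (d.insert s (pvFlush (c ++ ls.takeWhile (fun x => !pvHdr x))))
          (ls.dropWhile (fun x => !pvHdr x))) ∧
    (∀ (d : PySem.Dict String String) (c : List String) (cur : Option String),
      cur = none ∨ cur = some "" →
      pvFlushA (ls.foldl pvStepA (d, cur, c)) = pvSpan d ls) := by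
  induction ls with
  | nil =>
    constructor
    · intro d s c hs
      simp [pvFlushA, pvSpan, pvFlush, hs]
    · intro d c cur hcur
      rcases hcur with h | h <;> subst h <;> simp [pvFlushA, pvSpan]
  | cons l ls ih =>
    have hstep_hdr : ∀ st, pvHdr l = true →
        pvStepA st l = (pvFlushA st, some (pvNm l), []) := by
      intro st h
      simp only [pvStepA, pvNm]
      rw [if_pos (by simpa [pvHdr] using h)]
    have hstep_no : ∀ st, pvHdr l = false →
        pvStepA st l = (match st.2.1 with
          | some cur => if cur == "" then st else (st.1, st.2.1, st.2.2 ++ [l])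
          | none => st) := by
      intro st h
      simp only [pvStepA]
      rw [if_neg (by simpa [pvHdr] using h)]
    constructor
    · intro d s c hs
      by_cases h : pvHdr l
      · rw [List.foldl_cons, hstep_hdr _ h]
        have hfl : pvFlushA (d, some s, c) = d.insert s (pvFlush c) := by
          simp [pvFlushA, pvFlush, hs]
        rw [hfl]
        by_cases hnm : (pvNm l == "") = true
        · have hnm' : pvNm l = "" := by simpa using hnm
          rw [hnm', ih.2 _ [] (some "") (Or.inr rfl)]
          rw [List.takeWhile_cons_of_neg (by simp [h]), List.dropWhile_cons_of_neg (by simp [h])]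
          rw [pvSpan]
          simp only [h, if_pos, hnm', List.append_nil]
          rw [if_pos (by simp), pvSpan_dropWhile]
        · rw [ih.1 _ (pvNm l) [] hnm]
          rw [List.takeWhile_cons_of_neg (by simp [h]), List.dropWhile_cons_of_neg (by simp [h])]
          conv_rhs => rw [pvSpan]
          simp only [h, if_pos, List.append_nil, List.nil_append]
          rw [if_neg hnm]
      · rw [List.foldl_cons, hstep_no _ (by simpa using h)]
        simp only [if_neg hs]
        rw [ih.1 _ s (c ++ [l]) hs]
        rw [List.takeWhile_cons_of_pos (by simp [h]), List.dropWhile_cons_of_pos (by simp [h])]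
        simp
    · intro d c cur hcur
      by_cases h : pvHdr l
      · rw [List.foldl_cons, hstep_hdr _ h]
        have hfl : pvFlushA (d, cur, c) = d := by
          rcases hcur with h' | h' <;> subst h' <;> simp [pvFlushA]
        rw [hfl]
        by_cases hnm : (pvNm l == "") = true
        · have hnm' : pvNm l = "" := by simpa using hnm
          rw [hnm', ih.2 _ [] (some "") (Or.inr rfl)]
          conv_rhs => rw [pvSpan]
          simp only [h, if_pos, hnm']
          rw [if_pos (by simp), pvSpan_dropWhile]
        · rw [ih.1 _ (pvNm l) [] hnm]
          conv_rhs => rw [pvSpan]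
          simp only [h, if_pos, List.nil_append]
          rw [if_neg hnm]
      · rw [List.foldl_cons, hstep_no _ (by simpa using h)]
        have hst : (match (d, cur, c).2.1 with
            | some cur' => if cur' == "" then (d, cur, c) else (d, cur, c ++ [l])
            | none => (d, cur, c)) = (d, cur, c) := by
          rcases hcur with h' | h' <;> subst h' <;> simp
        rw [hst, ih.2 _ c cur hcur]
        conv_rhs => rw [pvSpan]
        simp [h]

-- B's header list, in Nat indices
def pvHdrsN : Nat → List String → List (Nat × String)
  | _, [] => []
  | n, l :: ls => if pvHdr l then (n, l) :: pvHdrsN (n + 1) ls else pvHdrsN (n + 1) ls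

lemma pvHdrs_eq (ls : List String) (n : Nat) :
    (PySem.List.enumerate ls (n : Int)).filter (fun p =>
      PySem.Str.startswith (PySem.Str.strip p.2) "**" && PySem.Str.endswith (PySem.Str.strip p.2) "**")
      = (pvHdrsN n ls).map (fun q => ((q.1 : Int), q.2)) := by
  induction ls generalizing n with
  | nil => simp [pvHdrsN, PySem.List.enumerate_nil]
  | cons l ls ih =>
    rw [PySem.List.enumerate_cons, List.filter_cons]
    have hcast : (n : Int) + 1 = ((n + 1 : Nat) : Int) := by push_cast; ring
    rw [hcast, ih (n + 1)]
    by_cases h : pvHdr l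
    · rw [pvHdrsN]
      rw [if_pos (by simpa [pvHdr] using h), if_pos (by simpa [pvHdr] using h)]
      simp
    · rw [pvHdrsN]
      rw [if_neg (by simpa [pvHdr] using h), if_neg (by simpa [pvHdr] using h)]

lemma pvHdrsN_shift (ls : List String) (n : Nat) :
    pvHdrsN n ls = pvHdrsN (n + (ls.takeWhile (fun x => !pvHdr x)).length)
      (ls.dropWhile (fun x => !pvHdr x)) := by
  induction ls generalizing n with
  | nil => rfl
  | cons l ls ih =>
    by_cases h : pvHdr l
    · rw [List.takeWhile_cons_of_neg (by simp [h]), List.dropWhile_cons_of_neg (by simp [h])]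
      simp
    · rw [List.takeWhile_cons_of_pos (by simp [h]), List.dropWhile_cons_of_pos (by simp [h])]
      rw [pvHdrsN]; simp only [h, if_neg, Bool.false_eq_true, not_false_iff]
      rw [ih (n + 1)]
      congr 1
      simp
      omega

-- the main correspondence: B's zip-of-slices fold computes pvSpan
lemma pvB_main (N : Nat) (ls : List String) (n : Nat) (L : List String)
    (d : PySem.Dict String String) (hN : ls.length ≤ N) (hL : L.drop n = ls) :
    (((pvHdrsN n ls).map (fun q => ((q.1 : Int), q.2))).zip
        ((((pvHdrsN n ls).map (fun q => ((q.1 : Int), q.2))).drop 1).map (·.1)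
          ++ [(L.length : Int)])).foldl (pvStepB L) d
      = pvSpan d ls := by
  induction N generalizing ls n d with
  | zero =>
    have hnil : ls = [] := List.eq_nil_of_length_eq_zero (Nat.le_zero.mp hN)
    subst hnil; simp [pvHdrsN, pvSpan]
  | succ N ih =>
    cases ls with
    | nil => simp [pvHdrsN, pvSpan]
    | cons l ls =>
      have hdrop1 : L.drop (n + 1) = ls := by
        have := congrArg List.tail hL
        simpa [← List.drop_add_one_eq_tail_drop] using this
      have hlenls : ls.length = L.length - (n + 1) := by
        have := congrArg List.length hdrop1
        simpa using this.symm
      have hnlt : n + 1 <= L.length := by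
        have h1 : (L.drop n).length = ls.length + 1 := by rw [hL]; simp
        simp only [List.length_drop] at h1
        omega
      by_cases h : pvHdr l
      · -- header line
        rw [pvHdrsN, if_pos h, pvHdrsN_shift ls (n + 1)]
        have hdropm : L.drop (n + 1 + (ls.takeWhile (fun x => !pvHdr x)).length)
            = ls.dropWhile (fun x => !pvHdr x) := by
          rw [← List.drop_drop, hdrop1, pvDropWhile_eq_drop]
        have hcast : (n : Int) + 1 = ((n + 1 : Nat) : Int) := by push_cast; ring
        obtain hrc | ⟨hd, rest, hrc⟩ : ls.dropWhile (fun x => !pvHdr x) = [] ∨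
            ∃ hd rest, ls.dropWhile (fun x => !pvHdr x) = hd :: rest := by
          cases ls.dropWhile (fun x => !pvHdr x) with
          | nil => exact Or.inl rfl
          | cons a b => exact Or.inr ⟨a, b, rfl⟩
        · -- no further header
          have hbls : ls.takeWhile (fun x => !pvHdr x) = ls :=
            pvTakeWhile_of_dropWhile_nil _ _ hrc
          rw [hrc, pvHdrsN]
          simp only [List.map_cons, List.map_nil, List.drop_succ_cons, List.drop_nil,
            List.nil_append, List.zip_cons_cons, List.zip_nil_right, List.foldl_cons,
            List.foldl_nil]
          rw [pvSpan, if_pos h, hrc, pvSpan]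
          simp only [pvStepB, pvNm, pvFlush]
          rw [hcast, PySem.List.slice_natCast, hdrop1]
          have hl2 : L.length - (n + 1) = ls.length := by omega
          rw [hl2, List.take_length, hbls]
        · -- next header found
          have hhd : pvHdr hd = true := pvHdr_head_dropWhile ls hd rest hrc
          rw [hrc, pvHdrsN, if_pos hhd]
          simp only [List.map_cons, List.drop_succ_cons, List.drop_zero,
            List.cons_append, List.zip_cons_cons, List.foldl_cons]
          have hstep1 : pvStepB L d (((n : Int), l),
              ((n + 1 + (ls.takeWhile (fun x => !pvHdr x)).length : Nat) : Int)) =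
              (if pvNm l == "" then d
               else d.insert (pvNm l) (pvFlush (ls.takeWhile (fun x => !pvHdr x)))) := by
            simp only [pvStepB, pvNm, pvFlush]
            rw [hcast, PySem.List.slice_natCast, hdrop1]
            have h3 : n + 1 + (ls.takeWhile (fun x => !pvHdr x)).length - (n + 1)
                = (ls.takeWhile (fun x => !pvHdr x)).length := by omega
            rw [h3, pvTake_takeWhile]
          rw [hstep1]
          have hN' : (hd :: rest).length ≤ N := by
            have h1 : (ls.dropWhile (fun x => !pvHdr x)).length ≤ ls.length :=
              List.length_dropWhile_le _ _
            rw [hrc] at h1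
            have h2 : (l :: ls).length ≤ N + 1 := hN
            simp only [List.length_cons] at h1 h2 ⊢
            omega
          have hih := ih (hd :: rest) (n + 1 + (ls.takeWhile (fun x => !pvHdr x)).length)
              (if pvNm l == "" then d
               else d.insert (pvNm l) (pvFlush (ls.takeWhile (fun x => !pvHdr x)))) hN'
              (by rw [hdropm, hrc])
          rw [pvHdrsN, if_pos hhd] at hih
          simp only [List.map_cons, List.drop_succ_cons, List.drop_zero] at hih
          rw [hih]
          conv_rhs => rw [pvSpan]
          rw [if_pos h, hrc]
      · -- non-header line
        rw [pvHdrsN, if_neg (by simp [h])]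
        rw [ih ls (n + 1) d (by simpa using Nat.le_of_succ_le_succ (by simpa using hN)) hdrop1]
        rw [pvSpan, if_neg (by simp [h])]

-- ===== VERDICT (by name: the statement is the Claim_ definition above) =====
theorem extract_structured_sections_py_spec : Claim_equal_extract_structured_sections_py := by
  intro text _
  unfold Spec_extract_structured_sections_py
  unfold extract_structured_sections_py extract_structured_sections_py_alt
  set lines := (PySem.Str.split? text "\n").getD [] with hlines
  have hA : pvFlushA (lines.foldl pvStepA (PySem.Dict.empty, none, [])) =
      pvSpan PySem.Dict.empty lines := (pvA_combined lines).2 _ [] none (Or.inl rfl)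
  have hB := pvB_main lines.length lines 0 lines PySem.Dict.empty le_rfl (by simp)
  have hh := pvHdrs_eq lines 0
  simp only [Nat.cast_zero] at hh
  simp only [hh, hB, hA]
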